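-- pv_equiv track=rewrite | github.com/my-axel/goldfinch | src/backend/app/services/data_sources/stooq_source.py | yahoo_to_stooq_symbol
-- ===== SOURCE A (Python) =====
-- from typing import Optional
--
-- YAHOO_TO_STOOQ_SUFFIX: dict[str, str] = {
--     ".L":  ".UK",   # London Stock Exchange
--     ".PA": ".FR",   # Euronext Paris
--     ".AS": ".NL",   # Amsterdam
--     ".BE": ".BE",   # Brussels (Euronext)
--     ".DE": ".DE",   # Frankfurt/XETRA
--     ".F":  ".DE",   # Frankfurt (alternative Yahoo notation)
--     ".SW": ".CH",   # Switzerland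
--     ".JP": ".JP",   # Japan
--     ".MI": ".IT",   # Milan (Euronext)
--     ".MC": ".ES",   # Madrid
--     ".HE": ".FI",   # Helsinki
--     ".ST": ".SE",   # Stockholm
--     ".CO": ".DK",   # Copenhagen
--     ".OL": ".NO",   # Oslo
-- }
--
-- def yahoo_to_stooq_symbol(yahoo_symbol: str) -> Optional[str]:
--     """
--     Convert a Yahoo Finance ticker to Stooq format.
--     Returns None for suffixes not known to Stooq (e.g. .MU, .DU, .VI).
--     """
--     for yahoo_suffix, stooq_suffix in YAHOO_TO_STOOQ_SUFFIX.items():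
--         if yahoo_symbol.endswith(yahoo_suffix):
--             base = yahoo_symbol[: -len(yahoo_suffix)]
--             return f"{base}{stooq_suffix}"
--     # US stocks with no exchange suffix
--     if "." not in yahoo_symbol:
--         return f"{yahoo_symbol}.US"
--     # Unknown suffix — not available on Stooq
--     return None
-- ===== SOURCE B (Python) =====
-- from typing import Optional
--
-- YAHOO_TO_STOOQ_SUFFIX: dict[str, str] = {
--     ".L":  ".UK",
--     ".PA": ".FR",
--     ".AS": ".NL",
--     ".BE": ".BE",
--     ".DE": ".DE",
--     ".F":  ".DE",
--     ".SW": ".CH",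
--     ".JP": ".JP",
--     ".MI": ".IT",
--     ".MC": ".ES",
--     ".HE": ".FI",
--     ".ST": ".SE",
--     ".CO": ".DK",
--     ".OL": ".NO",
-- }
--
-- def yahoo_to_stooq_symbol(yahoo_symbol: str) -> Optional[str]:
--     """Single direct lookup on the last-dot suffix instead of scanning all entries."""
--     idx = yahoo_symbol.rfind('.')
--     if idx == -1:
--         return f"{yahoo_symbol}.US"
--     mapped = YAHOO_TO_STOOQ_SUFFIX.get(yahoo_symbol[idx:])
--     if mapped is None:
--         return None
--     return yahoo_symbol[:idx] + mapped
-- ===== Notes on version B (the rewrite author's own statement) =====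
-- stated objective: simpler
-- what changed: B computes the last-dot suffix once via str.rfind and does a single direct dict lookup on it (correct because endswith can only match at the last dot), replacing A's scan over all 14 dict entries with endswith on each.
import Mathlib
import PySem

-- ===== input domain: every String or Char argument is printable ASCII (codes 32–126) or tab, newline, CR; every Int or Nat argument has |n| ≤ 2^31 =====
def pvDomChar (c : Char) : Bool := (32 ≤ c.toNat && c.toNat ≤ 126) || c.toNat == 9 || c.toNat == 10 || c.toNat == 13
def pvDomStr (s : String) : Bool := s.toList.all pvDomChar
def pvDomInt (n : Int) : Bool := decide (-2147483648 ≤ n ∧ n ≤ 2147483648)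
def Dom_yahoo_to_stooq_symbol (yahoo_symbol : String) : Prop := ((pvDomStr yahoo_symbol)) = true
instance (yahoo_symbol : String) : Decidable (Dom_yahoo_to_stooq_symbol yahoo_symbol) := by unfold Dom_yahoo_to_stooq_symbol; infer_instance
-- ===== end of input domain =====

-- B replaces A's scan over all 14 dict entries by one direct lookup keyed on the suffix
-- starting at the last '.' (objective: simpler — the loop-with-endswith disappears).

-- The module-level dict YAHOO_TO_STOOQ_SUFFIX (insertion order; keys distinct).
def STOOQ_TABLE : PySem.Dict String String := ⟨[
  (".L", ".UK"), (".PA", ".FR"), (".AS", ".NL"), (".BE", ".BE"), (".DE", ".DE"),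
  (".F", ".DE"), (".SW", ".CH"), (".JP", ".JP"), (".MI", ".IT"), (".MC", ".ES"),
  (".HE", ".FI"), (".ST", ".SE"), (".CO", ".DK"), (".OL", ".NO")]⟩

-- ===== PORT A =====
-- 'for yahoo_suffix, stooq_suffix in YAHOO_TO_STOOQ_SUFFIX.items(): if yahoo_symbol.endswith(…): return …'
def aLoop (entries : List (String × String)) (l : List Char) : Option (List Char) :=
  match entries with
  | [] => none
  | (ysuf, ssuf) :: rest =>
      if PySem.Chars.endswith l ysuf.toList then
        -- base = yahoo_symbol[:-len(yahoo_suffix)]; return f"{base}{stooq_suffix}"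
        some (PySem.List.slice l none (some (-(ysuf.toList.length : Int))) ++ ssuf.toList)
      else aLoop rest l

def yahoo_to_stooq_symbol (yahoo_symbol : String) : Option String :=
  match aLoop STOOQ_TABLE.items yahoo_symbol.toList with
  | some r => some (String.ofList r)
  | none =>
      -- if "." not in yahoo_symbol: return f"{yahoo_symbol}.US" ; return None
      if PySem.Chars.isIn ['.'] yahoo_symbol.toList then none
      else some (String.ofList (yahoo_symbol.toList ++ ".US".toList))

-- ===== PORT B =====
def yahoo_to_stooq_symbol_alt (yahoo_symbol : String) : Option String :=
  -- idx = yahoo_symbol.rfind('.') (inlined at each use)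
  if PySem.Chars.rfind yahoo_symbol.toList ['.'] = -1 then
    some (String.ofList (yahoo_symbol.toList ++ ".US".toList))
  else
    match STOOQ_TABLE.get? (String.ofList (PySem.List.slice yahoo_symbol.toList
        (some (PySem.Chars.rfind yahoo_symbol.toList ['.'])) none)) with
    | none => none
    | some mapped => some (String.ofList (PySem.List.slice yahoo_symbol.toList none
        (some (PySem.Chars.rfind yahoo_symbol.toList ['.'])) ++ mapped.toList))

-- ===== PRECONDITION & SPEC =====
def Spec_yahoo_to_stooq_symbol (yahoo_symbol : String) (out : Option String) : Prop := out = yahoo_to_stooq_symbol_alt yahoo_symbol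
instance (yahoo_symbol : String) (out : Option String) : Decidable (Spec_yahoo_to_stooq_symbol yahoo_symbol out) := by unfold Spec_yahoo_to_stooq_symbol; infer_instance

-- ===== CLAIM (what is proved, stated in full; the proofs are below) =====
def Claim_equal_yahoo_to_stooq_symbol : Prop := ∀ (yahoo_symbol : String), Dom_yahoo_to_stooq_symbol yahoo_symbol → Spec_yahoo_to_stooq_symbol yahoo_symbol (yahoo_to_stooq_symbol yahoo_symbol)

-- ===== LEMMAS AND PROOFS =====

theorem go_neg (l sub : List Char) (k : Nat) (h : ∀ i ≤ k, ¬ sub <+: l.drop i) :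
    PySem.Chars.rfind.go l sub k = -1 := by
  induction k with
  | zero =>
      simp only [PySem.Chars.rfind.go]
      have := h 0 (le_refl 0)
      simp at this
      simp [this]
  | succ j ih =>
      have h1 := h (j+1) (le_refl _)
      simp only [PySem.Chars.rfind.go]
      simp [h1]
      exact ih (fun i hi => h i (Nat.le_succ_of_le hi))

theorem go_pos (l sub : List Char) (i k : Nat) (hik : i ≤ k)
    (hp : sub <+: l.drop i)
    (hmax : ∀ j, i < j → j ≤ k → ¬ sub <+: l.drop j) :
    PySem.Chars.rfind.go l sub k = i := by
  induction k with
  | zero =>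
      interval_cases i
      simp only [PySem.Chars.rfind.go]
      simp at hp
      simp [hp]
  | succ j ih =>
      by_cases hj : sub <+: l.drop (j+1)
      · have hi : i = j + 1 := by
          by_contra hne
          exact hmax (j+1) (lt_of_le_of_ne hik (fun h => hne h)) (le_refl _) hj
        simp only [PySem.Chars.rfind.go]
        simp [hj, hi]
      · have hij : i ≤ j := by
          by_contra hgt
          have : i = j + 1 := by omega
          exact hj (this ▸ hp)
        simp only [PySem.Chars.rfind.go]
        simp [hj]
        exact ih hij (fun j' h1 h2 => hmax j' h1 (Nat.le_succ_of_le h2))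

theorem prefix_dot_iff (t : List Char) : ['.'] <+: t ↔ ∃ t', t = '.' :: t' := by
  constructor
  · rintro ⟨r, hr⟩
    exact ⟨r, hr.symm⟩
  · rintro ⟨t', rfl⟩
    exact ⟨t', rfl⟩

-- the last dot of p ++ '.'::cs (dot-free cs) sits at index p.length
theorem rfind_last_dot (p cs : List Char) (hcs : '.' ∉ cs) :
    PySem.Chars.rfind (p ++ '.' :: cs) ['.'] = (p.length : Int) := by
  unfold PySem.Chars.rfind
  apply go_pos
  · simp
  · rw [List.drop_left]
    exact ⟨cs, rfl⟩
  · intro j hj hjle hpre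
    rw [prefix_dot_iff] at hpre
    obtain ⟨t', ht⟩ := hpre
    have hd : (p ++ '.' :: cs).drop j = cs.drop (j - p.length - 1) := by
      rw [List.drop_append]
      rw [List.drop_eq_nil_of_le (le_of_lt hj)]
      have h2 : j - p.length = (j - p.length - 1) + 1 := by omega
      rw [h2]
      simp
    have : '.' ∈ cs := by
      apply List.mem_of_mem_drop (i := j - p.length - 1)
      rw [← hd, ht]
      exact List.mem_cons_self
    exact hcs this

theorem rfind_no_dot (l : List Char) (h : '.' ∉ l) :
    PySem.Chars.rfind l ['.'] = -1 := by
  unfold PySem.Chars.rfind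
  apply go_neg
  intro i _ hp
  rw [prefix_dot_iff] at hp
  obtain ⟨t', ht⟩ := hp
  exact h (List.mem_of_mem_drop (l := l) (i := i) (ht ▸ List.mem_cons_self))

theorem exists_last_dot (l : List Char) (h : '.' ∈ l) :
    ∃ p cs, l = p ++ '.' :: cs ∧ '.' ∉ cs := by
  induction l using List.reverseRecOn with
  | nil => simp at h
  | append_singleton init a ih =>
      by_cases ha : a = '.'
      · exact ⟨init, [], by simp [ha], by simp⟩
      · have hmem : '.' ∈ init := by
          rcases List.mem_append.mp h with h1 | h1
          · exact h1
          · simp at h1; exact absurd h1.symm ha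
        obtain ⟨p, cs, heq, hcs⟩ := ih hmem
        refine ⟨p, cs ++ [a], by simp [heq], ?_⟩
        simp [hcs]
        exact fun h => ha h.symm

-- a dot-headed, otherwise dot-free key is a suffix of p ++ '.'::cs iff it IS '.'::cs
theorem endswith_key_iff (p cs ds : List Char) (hcs : '.' ∉ cs) (hds : '.' ∉ ds) :
    PySem.Chars.endswith (p ++ '.' :: cs) ('.' :: ds) = true ↔ ds = cs := by
  rw [PySem.Chars.endswith_iff]
  constructor
  · rintro ⟨q, hq⟩
    have h1 : PySem.Chars.rfind (p ++ '.' :: cs) ['.'] = (q.length : Int) := by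
      rw [← hq]; exact rfind_last_dot q ds hds
    have h2 : PySem.Chars.rfind (p ++ '.' :: cs) ['.'] = (p.length : Int) :=
      rfind_last_dot p cs hcs
    have hlen : q.length = p.length := by
      rw [h1] at h2; exact_mod_cast h2
    have hdrop : ('.' :: ds) = ('.' :: cs) := by
      have ha : (q ++ '.' :: ds).drop q.length = '.' :: ds := List.drop_left
      have hb : (p ++ '.' :: cs).drop p.length = '.' :: cs := List.drop_left
      rw [← ha, hq, hlen, hb]
    exact (List.cons.injEq _ _ _ _ ▸ hdrop).2
  · rintro rfl
    exact ⟨p, rfl⟩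

-- shape of every table key: '.' followed by a dot-free nonempty tail
def keyShaped (e : String × String) : Prop :=
  e.1.toList.head? = some '.' ∧ '.' ∉ e.1.toList.tail

theorem aLoop_eq_find? (t : List (String × String)) (hsh : ∀ e ∈ t, keyShaped e)
    (p cs : List Char) (hcs : '.' ∉ cs) :
    aLoop t (p ++ '.' :: cs) =
      (t.find? (fun e => e.1 == String.ofList ('.' :: cs))).map (fun e => p ++ e.2.toList) := by
  induction t with
  | nil => rfl
  | cons e rest ih =>
      obtain ⟨y, s⟩ := e
      obtain ⟨hh, htl⟩ := hsh (y, s) List.mem_cons_self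
      have hy : y.toList = '.' :: y.toList.tail := by
        cases hyl : y.toList with
        | nil => rw [hyl] at hh; simp at hh
        | cons a t' => rw [hyl] at hh; simp at hh; simp [hh]
      by_cases hmatch : y.toList.tail = cs
      · have heq : y = String.ofList ('.' :: cs) := by
          have : y.toList = '.' :: cs := by rw [hy, hmatch]
          calc y = String.ofList y.toList := by simp
            _ = String.ofList ('.' :: cs) := by rw [this]
        have hend : PySem.Chars.endswith (p ++ '.' :: cs) y.toList = true := by
          rw [hy]
          exact (endswith_key_iff p cs y.toList.tail hcs htl).mpr hmatch
        simp only [aLoop, hend, if_true]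
        have hfind : List.find? (fun e => e.1 == String.ofList ('.' :: cs)) ((y, s) :: rest)
            = some (y, s) := by
          simp [List.find?, heq]
        rw [hfind]
        simp only [Option.map_some]
        congr 1
        congr 1
        -- slice (p ++ '.'::cs) [:-len(y)] = p
        have hylen : y.toList.length = cs.length + 1 := by
          rw [hy, hmatch]; simp
        rw [hylen]
        rw [PySem.List.slice_to_neg_natCast (k := cs.length + 1) _ (by omega)]
        simp
      · have hne : y ≠ String.ofList ('.' :: cs) := by
          intro h
          apply hmatch
          have : y.toList = '.' :: cs := by rw [h]; simp
          rw [this]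
          rfl
        have hend : PySem.Chars.endswith (p ++ '.' :: cs) y.toList = false := by
          rw [hy]
          apply Bool.eq_false_iff.mpr
          intro h
          exact hmatch ((endswith_key_iff p cs y.toList.tail hcs htl).mp h)
        simp only [aLoop, hend, Bool.false_eq_true, if_false]
        rw [ih (fun e he => hsh e (List.mem_cons_of_mem _ he))]
        have : (y == String.ofList ('.' :: cs)) = false := by
          simp [hne]
        simp [List.find?, this]

theorem aLoop_none (t : List (String × String)) (l : List Char)
    (h : ∀ e ∈ t, PySem.Chars.endswith l e.1.toList = false) : aLoop t l = none := by
  induction t with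
  | nil => rfl
  | cons e rest ih =>
      obtain ⟨y, s⟩ := e
      simp only [aLoop]
      rw [h (y, s) List.mem_cons_self]
      simp only [Bool.false_eq_true, if_false]
      exact ih (fun e he => h e (List.mem_cons_of_mem _ he))

theorem infix_dot_iff (l : List Char) : ['.'] <:+: l ↔ '.' ∈ l := by
  constructor
  · intro h
    exact h.subset List.mem_cons_self
  · intro h
    obtain ⟨u, v, huv⟩ := List.append_of_mem h
    exact ⟨u, v, by rw [huv]; simp⟩

theorem table_shape : ∀ e ∈ STOOQ_TABLE.items, keyShaped e := by
  intro e he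
  unfold keyShaped
  fin_cases he <;> exact ⟨rfl, by decide⟩

-- ===== VERDICT (by name: the statement is the Claim_ definition above) =====
theorem yahoo_to_stooq_symbol_spec : Claim_equal_yahoo_to_stooq_symbol := by
  unfold Claim_equal_yahoo_to_stooq_symbol
  intro s _
  unfold Spec_yahoo_to_stooq_symbol
  unfold yahoo_to_stooq_symbol yahoo_to_stooq_symbol_alt
  by_cases hdot : '.' ∈ s.toList
  · obtain ⟨p, cs, hl, hcs⟩ := exists_last_dot s.toList hdot
    rw [hl, aLoop_eq_find? STOOQ_TABLE.items table_shape p cs hcs,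
        rfind_last_dot p cs hcs]
    rw [if_neg (show ¬((p.length : Int) = -1) by omega)]
    rw [PySem.List.slice_from_natCast, PySem.List.slice_to_natCast,
        List.drop_left, List.take_left]
    unfold PySem.Dict.get?
    cases hfd : List.find? (fun e => e.1 == String.ofList ('.' :: cs)) STOOQ_TABLE.items with
    | none =>
        have hin : PySem.Chars.isIn ['.'] (p ++ '.' :: cs) = true :=
          (PySem.Chars.isIn_iff_infix _ _).mpr ((infix_dot_iff _).mpr (by simp))
        simp [hin]
    | some e =>
        simp
  · have hr : PySem.Chars.rfind s.toList ['.'] = -1 := rfind_no_dot _ hdot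
    rw [aLoop_none STOOQ_TABLE.items s.toList (by
      intro e he
      obtain ⟨hh, htl⟩ := table_shape e he
      have hy : e.1.toList = '.' :: e.1.toList.tail := by
        cases hyl : e.1.toList with
        | nil => rw [hyl] at hh; simp at hh
        | cons a t' => rw [hyl] at hh; simp at hh; simp [hh]
      apply Bool.eq_false_iff.mpr
      intro hend
      rw [PySem.Chars.endswith_iff] at hend
      exact hdot (hend.subset (hy ▸ List.mem_cons_self)))]
    rw [hr]
    have hnin : PySem.Chars.isIn ['.'] s.toList = false :=
      PySem.Chars.isIn_eq_false_iff _ _ |>.mpr (fun h => hdot ((infix_dot_iff _).mp h))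
    simp [hnin]
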